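-- pv_equiv track=rewrite | github.com/itzvarunv/Classifier-Algorithm | scanner.py | gatekeeper_scorer
-- ===== SOURCE A (Python) =====
-- def gatekeeper_scorer(content, signals, blacklist):
--     score = 0
--     words = [w.strip('.,!?;:').lower() for w in content.split()]
--     for word in words:
--         if word in signals:
--             score += signals[word]
--         if word in blacklist:
--             score += blacklist[word]
--     return score
-- ===== SOURCE B (Python) =====
-- def gatekeeper_scorer(content, signals, blacklist):
--     counts = {}
--     for w in content.split():
--         k = w.strip('.,!?;:').lower()
--         counts[k] = counts.get(k, 0) + 1
--     total = 0
--     for w in signals: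
--         if w in counts:
--             total += signals[w] * counts[w]
--     for w in blacklist:
--         if w in counts:
--             total += blacklist[w] * counts[w]
--     return total
-- ===== Notes on version B (the rewrite author's own statement) =====
-- stated objective: alternative
-- what changed: B builds a frequency table of the normalized words once and then sums score*count over the dictionaries' keys, instead of scanning every word and probing both dicts per word.
import Mathlib
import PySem

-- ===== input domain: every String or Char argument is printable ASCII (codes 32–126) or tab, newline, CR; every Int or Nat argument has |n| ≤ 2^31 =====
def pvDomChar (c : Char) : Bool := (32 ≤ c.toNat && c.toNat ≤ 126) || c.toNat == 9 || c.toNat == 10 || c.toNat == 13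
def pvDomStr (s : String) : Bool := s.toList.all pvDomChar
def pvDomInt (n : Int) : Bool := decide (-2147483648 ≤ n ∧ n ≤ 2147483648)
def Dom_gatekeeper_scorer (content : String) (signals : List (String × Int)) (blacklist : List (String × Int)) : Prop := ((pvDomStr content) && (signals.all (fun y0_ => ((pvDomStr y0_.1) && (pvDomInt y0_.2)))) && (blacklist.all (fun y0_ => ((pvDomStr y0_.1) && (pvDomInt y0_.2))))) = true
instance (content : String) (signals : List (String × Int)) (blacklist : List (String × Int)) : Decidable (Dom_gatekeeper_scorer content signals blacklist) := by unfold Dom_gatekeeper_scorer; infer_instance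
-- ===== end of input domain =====

-- B builds a frequency table of the normalized words once, then sums value*count over each dict's keys,
-- instead of scanning every word and probing both dicts per word (alternative decomposition, same cost class).

-- shared normalization helper: w.strip('.,!?;:').lower()
def pvNorm (w : String) : String := PySem.Str.lower (PySem.Str.stripChars w ".,!?;:")

-- ===== PORT A =====
def gatekeeper_scorer (content : String) (signals : List (String × Int)) (blacklist : List (String × Int)) : Int :=
  let sd := PySem.Dict.ofList signals
  let bd := PySem.Dict.ofList blacklist
  let words := (PySem.Str.split₀ content).map pvNorm
  words.foldl (fun score word =>
    let score := if sd.contains word then score + sd.getD word 0 else score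
    if bd.contains word then score + bd.getD word 0 else score) 0

-- ===== PORT B =====
def gatekeeper_scorer_alt (content : String) (signals : List (String × Int)) (blacklist : List (String × Int)) : Int :=
  let counts := (PySem.Str.split₀ content).foldl
    (fun d w => let k := pvNorm w; d.insert k (d.getD k 0 + 1)) PySem.Dict.empty
  let sd := PySem.Dict.ofList signals
  let bd := PySem.Dict.ofList blacklist
  let total := sd.keys.foldl
    (fun t w => if counts.contains w then t + sd.getD w 0 * counts.getD w 0 else t) 0
  bd.keys.foldl
    (fun t w => if counts.contains w then t + bd.getD w 0 * counts.getD w 0 else t) total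

-- ===== PRECONDITION & SPEC =====
def Spec_gatekeeper_scorer (content : String) (signals : List (String × Int)) (blacklist : List (String × Int)) (out : Int) : Prop := out = gatekeeper_scorer_alt content signals blacklist
instance (content : String) (signals : List (String × Int)) (blacklist : List (String × Int)) (out : Int) : Decidable (Spec_gatekeeper_scorer content signals blacklist out) := by unfold Spec_gatekeeper_scorer; infer_instance

-- ===== CLAIM (what is proved, stated in full; the proofs are below) =====
def Claim_equal_gatekeeper_scorer : Prop := ∀ (content : String) (signals : List (String × Int)) (blacklist : List (String × Int)), Dom_gatekeeper_scorer content signals blacklist → Spec_gatekeeper_scorer content signals blacklist (gatekeeper_scorer content signals blacklist)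

-- ===== LEMMAS AND PROOFS =====

-- a left fold that conditionally adds equals the start plus a sum
theorem pv_foldl_if_add {κ : Type} (l : List κ) (c : κ → Bool) (v : κ → Int) (a : Int) :
    l.foldl (fun t w => if c w then t + v w else t) a
      = a + (l.map (fun w => if c w then v w else 0)).sum := by
  induction l generalizing a with
  | nil => simp
  | cons w l ih =>
    simp only [List.foldl_cons, List.map_cons, List.sum_cons, ih]
    by_cases h : c w = true <;> (simp [h]; try ring)

-- picking one key out of a Nodup list by an if-sum
theorem pv_sum_pick {κ : Type} [DecidableEq κ] (ks : List κ) (hnd : ks.Nodup) (v : κ → Int) (w : κ) :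
    (ks.map (fun k => if k = w then v k else 0)).sum = if w ∈ ks then v w else 0 := by
  induction ks with
  | nil => simp
  | cons k ks ih =>
    simp only [List.map_cons, List.sum_cons, List.nodup_cons] at *
    rcases hnd with ⟨hk, hnd⟩
    by_cases h : k = w
    · subst h
      simp [ih hnd, hk]
    · simp [h, ih hnd]
      by_cases hw : w ∈ ks <;> simp [hw, Ne.symm h]

-- per-word conditional lookup sum equals per-key value*count sum
theorem pv_group_sum (d : PySem.Dict String Int) (hnd : d.keys.Nodup) (ws : List String) :
    (ws.map (fun w => if d.contains w then d.getD w 0 else 0)).sum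
      = (d.keys.map (fun k => d.getD k 0 * (ws.count k : Int))).sum := by
  induction ws with
  | nil => simp
  | cons w ws ih =>
    simp only [List.map_cons, List.sum_cons, ih]
    have hcount : ∀ k : String, ((w :: ws).count k : Int) = (ws.count k : Int) + (if k = w then 1 else 0) := by
      intro k
      by_cases h : k = w
      · subst h; simp
      · simp [h, Ne.symm h]
    have hsplit : (d.keys.map (fun k => d.getD k 0 * ((w :: ws).count k : Int))).sum
        = (d.keys.map (fun k => d.getD k 0 * (ws.count k : Int))).sum
          + (d.keys.map (fun k => if k = w then d.getD k 0 else 0)).sum := by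
      rw [← List.sum_map_add]
      apply congrArg
      apply List.map_congr_left
      intro k _
      rw [hcount k]
      by_cases h : k = w <;> (simp [h]; try ring)
    rw [hsplit, pv_sum_pick d.keys hnd (fun k => d.getD k 0) w]
    have hc : d.contains w = true ↔ w ∈ d.keys := PySem.Dict.contains_iff_mem_keys d w
    by_cases h : w ∈ d.keys
    · simp [hc.mpr h, h]; ring
    · have : d.contains w = false := by
        cases hcb : d.contains w
        · rfl
        · exact absurd (hc.mp hcb) h
      simp [this, h]

-- the B-side per-key term equals value*count
theorem pv_b_term (d : PySem.Dict String Int) (ws : List String) (k : String) :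
    (if (PySem.Dict.counter ws).contains k
       then d.getD k 0 * (PySem.Dict.counter ws).getD k 0 else 0)
      = d.getD k 0 * (ws.count k : Int) := by
  by_cases h : (PySem.Dict.counter ws).contains k = true
  · simp [h, PySem.Dict.getD_counter]
  · have hb : (PySem.Dict.counter ws).contains k = false := by
      cases hcb : (PySem.Dict.counter ws).contains k
      · rfl
      · exact absurd hcb h
    have hmem : k ∉ ws := by
      intro hm
      have : (PySem.Dict.counter ws).contains k = true := by
        rw [PySem.Dict.contains_counter]; simpa using hm
      simp [this] at hb
    simp [hb, List.count_eq_zero_of_not_mem hmem]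

-- ===== VERDICT (by name: the statement is the Claim_ definition above) =====
theorem gatekeeper_scorer_spec : Claim_equal_gatekeeper_scorer := by
  intro content signals blacklist _
  unfold Spec_gatekeeper_scorer gatekeeper_scorer gatekeeper_scorer_alt
  set sd := PySem.Dict.ofList signals with hsd
  set bd := PySem.Dict.ofList blacklist with hbd
  set ws := (PySem.Str.split₀ content).map pvNorm with hws
  have hcounts : (PySem.Str.split₀ content).foldl
      (fun d w => let k := pvNorm w; d.insert k (d.getD k 0 + 1)) PySem.Dict.empty
      = PySem.Dict.counter ws := by
    rw [hws]
    rw [← PySem.Dict.foldl_insert_getD_add_one_eq_counter]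
    rw [List.foldl_map]
  simp only [hcounts]
  -- A side: one fold with two conditional adds = sum of two per-word sums
  have hA : ws.foldl (fun score word =>
      let score := if sd.contains word then score + sd.getD word 0 else score
      if bd.contains word then score + bd.getD word 0 else score) 0
      = (ws.map (fun w => if sd.contains w then sd.getD w 0 else 0)).sum
        + (ws.map (fun w => if bd.contains w then bd.getD w 0 else 0)).sum := by
    have hfun : (fun (score : Int) (word : String) =>
        let score := if sd.contains word then score + sd.getD word 0 else score
        if bd.contains word then score + bd.getD word 0 else score)
        = fun score word => score + ((if sd.contains word then sd.getD word 0 else 0)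
            + (if bd.contains word then bd.getD word 0 else 0)) := by
      funext s w
      by_cases h1 : sd.contains w = true <;> by_cases h2 : bd.contains w = true <;>
        (simp [h1, h2]; try ring)
    rw [hfun, PySem.List.foldl_add]
    simp [← List.sum_map_add]
  -- B side: two key folds = two per-key sums
  have hB1 : sd.keys.foldl (fun t w => if (PySem.Dict.counter ws).contains w
        then t + sd.getD w 0 * (PySem.Dict.counter ws).getD w 0 else t) 0
      = (sd.keys.map (fun k => sd.getD k 0 * (ws.count k : Int))).sum := by
    rw [pv_foldl_if_add]
    simp only [zero_add]
    apply congrArg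
    exact List.map_congr_left (fun k _ => pv_b_term sd ws k)
  have hB2 : ∀ a : Int, bd.keys.foldl (fun t w => if (PySem.Dict.counter ws).contains w
        then t + bd.getD w 0 * (PySem.Dict.counter ws).getD w 0 else t) a
      = a + (bd.keys.map (fun k => bd.getD k 0 * (ws.count k : Int))).sum := by
    intro a
    rw [pv_foldl_if_add]
    exact congrArg (a + ·)
      (congrArg List.sum (List.map_congr_left (fun k _ => pv_b_term bd ws k)))
  rw [hA, hB2, hB1,
    pv_group_sum sd (PySem.Dict.nodup_keys_ofList signals) ws,
    pv_group_sum bd (PySem.Dict.nodup_keys_ofList blacklist) ws]
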